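-- pv_equiv track=rewrite | github.com/DaftAcademy/zajecia_python_mini_edycja3 | zajecia_3/praca_domowa/wzor/wikipedia_slowa.py | get_words_from_line
-- ===== SOURCE A (Python) =====
-- def get_words_from_line(line):
--     last = line.split('/')[-1]
--     name = last.split('.')[0]
--     words = set()
--     begin = 0
--     end = 0
--     in_word = False
--     for i in range(len(name)):
--         if name[i].isalpha():
--             if not in_word:
--                 in_word = True
--                 begin = i
--         else:
--             if in_word:
--                 in_word = False
--                 end = i
--                 words.add(name[begin:end])
--     if in_word:
--         words.add(name[begin:])
--     return words
-- ===== SOURCE B (Python) =====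
-- def get_words_from_line(line):
--     name = line.split('/')[-1].split('.')[0]
--     return set(''.join(c if c.isalpha() else ' ' for c in name).split())
-- ===== Notes on version B (the rewrite author's own statement) =====
-- stated objective: idiomatic
-- what changed: Replaces the begin/end-index in_word state machine with a translate-then-split: map every non-alphabetic character to a space and use str.split(), collecting the pieces into a set.
import Mathlib
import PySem

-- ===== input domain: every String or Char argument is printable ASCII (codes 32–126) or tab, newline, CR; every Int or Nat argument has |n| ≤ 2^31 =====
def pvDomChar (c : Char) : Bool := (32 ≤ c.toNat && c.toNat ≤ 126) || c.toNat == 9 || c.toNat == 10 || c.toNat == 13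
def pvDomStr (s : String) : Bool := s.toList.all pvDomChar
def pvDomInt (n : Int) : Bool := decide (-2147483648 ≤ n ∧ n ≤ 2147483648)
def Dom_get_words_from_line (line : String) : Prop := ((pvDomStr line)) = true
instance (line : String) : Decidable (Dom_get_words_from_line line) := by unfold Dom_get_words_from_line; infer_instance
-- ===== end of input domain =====

-- B replaces A's begin/end-index in_word state machine by mapping non-alphabetic chars to spaces and
-- splitting on whitespace (same return value; A is total, so no Pre_).

-- ===== PORT A =====
-- the loop body of A; state = (words, begin, end, in_word); name[i].isalpha() on a 1-char string
-- is PySem.Chars.isalpha of that character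
def pvStepA (cs : List Char) (st : PySem.Set String × Int × Int × Bool) (i : Int) :
    PySem.Set String × Int × Int × Bool :=
  if PySem.Chars.isalpha (PySem.List.pyGetD cs i ' ') then
    if !st.2.2.2 then (st.1, i, st.2.2.1, true) else st
  else
    if st.2.2.2 then
      (PySem.Set.add st.1 (String.ofList (PySem.List.slice cs (some st.2.1) (some i))), st.2.1, i, false)
    else st

-- the trailing 'if in_word: words.add(name[begin:])'
def pvFinA (cs : List Char) (st : PySem.Set String × Int × Int × Bool) : PySem.Set String :=
  if st.2.2.2 then PySem.Set.add st.1 (String.ofList (PySem.List.slice cs (some st.2.1) none)) else st.1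

def get_words_from_line (line : String) : List String :=
  -- split('/') / split('.') never return an empty list, so [-1] and [0] never raise; getD "" is unreachable
  let last := (PySem.List.pyGet? ((PySem.Str.split? line "/").getD []) (-1)).getD ""
  let name := (PySem.List.pyGet? ((PySem.Str.split? last ".").getD []) 0).getD ""
  let cs := name.toList
  pvFinA cs ((PySem.List.pyRange 0 (cs.length : Int) 1).foldl (pvStepA cs) (PySem.Set.empty, 0, 0, false))

-- ===== PORT B =====
def get_words_from_line_alt (line : String) : List String :=
  let last := (PySem.List.pyGet? ((PySem.Str.split? line "/").getD []) (-1)).getD ""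
  let name := (PySem.List.pyGet? ((PySem.Str.split? last ".").getD []) 0).getD ""
  let translated := name.toList.map (fun c => if PySem.Chars.isalpha c then c else ' ')
  PySem.Set.ofList ((PySem.Chars.split₀ translated).map String.ofList)

-- ===== PRECONDITION & SPEC =====
def Spec_get_words_from_line (line : String) (out : List String) : Prop := out = get_words_from_line_alt line
instance (line : String) (out : List String) : Decidable (Spec_get_words_from_line line out) := by unfold Spec_get_words_from_line; infer_instance

-- ===== CLAIM (what is proved, stated in full; the proofs are below) =====
def Claim_equal_get_words_from_line : Prop := ∀ (line : String), Dom_get_words_from_line line → Spec_get_words_from_line line (get_words_from_line line)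

-- ===== LEMMAS AND PROOFS =====

-- split₀.go without the reversed accumulator
def pvSgo : List Char → List Char → List (List Char)
  | [], cur => if cur.isEmpty then [] else [cur.reverse]
  | c :: rest, cur =>
    if PySem.Chars.isspace c then
      if cur.isEmpty then pvSgo rest [] else cur.reverse :: pvSgo rest []
    else pvSgo rest (c :: cur)

theorem pvGo_eq_sgo (s cur : List Char) (acc : List (List Char)) :
    PySem.Chars.split₀.go s cur acc = acc.reverse ++ pvSgo s cur := by
  induction s generalizing cur acc with
  | nil => simp [PySem.Chars.split₀.go, pvSgo]; split <;> simp
  | cons c rest ih =>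
    simp only [PySem.Chars.split₀.go, pvSgo]
    split <;> [skip; exact ih _ _] 
    split <;> simp [ih]

theorem pvAlpha_not_space (c : Char) (h : PySem.Chars.isalpha c = true) :
    PySem.Chars.isspace c = false := by
  simp only [PySem.Chars.isalpha, PySem.Chars.isupper, PySem.Chars.islower, Bool.or_eq_true,
    Bool.and_eq_true, decide_eq_true_eq, Char.le_def, UInt32.le_iff_toNat_le] at h
  simp only [PySem.Chars.isspace, Char.toNat, Bool.or_eq_false_iff, decide_eq_false_iff_not,
    Bool.and_eq_false_iff]
  have h1 : 'A'.val.toNat = 65 := rfl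
  have h2 : 'Z'.val.toNat = 90 := rfl
  have h3 : 'a'.val.toNat = 97 := rfl
  have h4 : 'z'.val.toNat = 122 := rfl
  rw [h1, h2] at h; rw [h3, h4] at h
  norm_num at h ⊢
  omega

theorem pvMain (cs : List Char) (rest : List Char) (a : Nat) (ha : cs.drop a = rest)
    (hle : a ≤ cs.length) (w : PySem.Set String) (b0 e : Int) :
    (pvFinA cs ((PySem.List.pyRange (a : Int) (cs.length : Int) 1).foldl (pvStepA cs) (w, b0, e, false))
        = (pvSgo (rest.map (fun c => if PySem.Chars.isalpha c then c else ' ')) []).foldl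
            (fun w r => PySem.Set.add w (String.ofList r)) w) ∧
    (∀ (b : Nat), b < a → (∀ j (hj : j < cs.length), b ≤ j → j < a → PySem.Chars.isalpha cs[j] = true) →
      pvFinA cs ((PySem.List.pyRange (a : Int) (cs.length : Int) 1).foldl (pvStepA cs) (w, (b : Int), e, true))
        = (pvSgo (rest.map (fun c => if PySem.Chars.isalpha c then c else ' '))
              (((cs.drop b).take (a - b)).reverse)).foldl
            (fun w r => PySem.Set.add w (String.ofList r)) w) := by
  induction rest generalizing a w b0 e with
  | nil =>
    have haL : a = cs.length := by
      have := List.drop_eq_nil_iff.mp ha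
      omega
    subst haL
    rw [PySem.List.pyRange_one_eq_nil (le_refl _)]
    constructor
    · simp [pvFinA, pvSgo]
    · intro b hb hrun
      have hdr : (cs.drop b).take (cs.length - b) = cs.drop b := by
        apply List.take_of_length_le; simp
      have hne : cs.drop b ≠ [] := by
        intro hcon
        have := List.drop_eq_nil_iff.mp hcon
        omega
      simp [pvFinA, pvSgo, hdr, hne, PySem.List.slice_from_natCast]
  | cons c rest' ih =>
    have haL : a < cs.length := by
      by_contra hcon
      rw [List.drop_eq_nil_iff.mpr (by omega)] at ha
      simp at ha
    have hget : cs[a] = c := by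
      have h0 : (cs.drop a)[0]? = some c := by rw [ha]; rfl
      rw [List.getElem?_drop] at h0
      simpa [List.getElem?_eq_getElem haL] using h0
    have hdrop1 : cs.drop (a + 1) = rest' := by
      rw [← List.drop_drop]
      rw [show cs.drop a = c :: rest' from ha]
      rfl
    have hcons : PySem.List.pyRange (a : Int) (cs.length : Int) 1
        = (a : Int) :: PySem.List.pyRange ((a : Int) + 1) (cs.length : Int) 1 :=
      PySem.List.pyRange_one_cons (by exact_mod_cast haL)
    have hcast : ((a : Int) + 1) = ((a + 1 : Nat) : Int) := by push_cast; ring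
    have hgetD : PySem.List.pyGetD cs ((a : Int)) ' ' = c := by
      simp [PySem.List.pyGetD_natCast, List.getD, hget, List.getElem?_eq_getElem haL]
    by_cases hc : PySem.Chars.isalpha c = true
    · -- current character is alphabetic
      have hsp := pvAlpha_not_space c hc
      constructor
      · -- was not in a word: enter one at begin = a
        rw [hcons, List.foldl_cons]
        have hstep : pvStepA cs (w, b0, e, false) (a : Int) = (w, (a : Int), e, true) := by
          simp [pvStepA, hgetD, hc]
        rw [hstep, hcast]
        have := (ih (a + 1) hdrop1 (by omega) w b0 e).2 a (by omega)
          (fun j hj h1 h2 => by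
            have : j = a := by omega
            subst this; rw [hget]; exact hc)
        rw [this]
        have hcur : (cs.drop a).take (a + 1 - a) = [c] := by
          rw [show cs.drop a = c :: rest' from ha]
          simp
        rw [hcur]
        simp [pvSgo, hc, hsp]
      · -- already in a word: state unchanged, run extends
        intro b hb hrun
        rw [hcons, List.foldl_cons]
        have hstep : pvStepA cs ((w, (b : Int), e, true)) (a : Int) = (w, (b : Int), e, true) := by
          simp [pvStepA, hgetD, hc]
        rw [hstep, hcast]
        have := (ih (a + 1) hdrop1 (by omega) w b0 e).2 b (by omega)
          (fun j hj h1 h2 => by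
            by_cases hja : j = a
            · subst hja; rw [hget]; exact hc
            · exact hrun j hj h1 (by omega))
        rw [this]
        have hext : (cs.drop b).take (a + 1 - b) = (cs.drop b).take (a - b) ++ [c] := by
          have hidx : (cs.drop b)[a - b]? = some c := by
            rw [List.getElem?_drop]
            rw [show b + (a - b) = a by omega]
            rw [List.getElem?_eq_getElem haL, hget]
          rw [show a + 1 - b = (a - b) + 1 by omega, List.take_add_one, hidx]
          rfl
        rw [hext]
        simp [pvSgo, hc, hsp]
    · -- current character is not alphabetic
      have hc' : PySem.Chars.isalpha c = false := by simpa using hc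
      constructor
      · -- not in a word: nothing happens
        rw [hcons, List.foldl_cons]
        have hstep : pvStepA cs (w, b0, e, false) (a : Int) = (w, b0, e, false) := by
          simp [pvStepA, hgetD, hc']
        rw [hstep, hcast]
        rw [(ih (a + 1) hdrop1 (by omega) w b0 e).1]
        simp [pvSgo, hc', PySem.Chars.isspace]
      · -- in a word: the run [b, a) is closed and added
        intro b hb hrun
        rw [hcons, List.foldl_cons]
        have hstep : pvStepA cs ((w, (b : Int), e, true)) (a : Int)
            = (PySem.Set.add w (String.ofList (PySem.List.slice cs (some (b : Int)) (some (a : Int)))),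
               (b : Int), (a : Int), false) := by
          simp [pvStepA, hgetD, hc']
        rw [hstep, hcast]
        rw [(ih (a + 1) hdrop1 (by omega)
          (PySem.Set.add w (String.ofList (PySem.List.slice cs (some (b : Int)) (some (a : Int)))))
          (b : Int) (a : Int)).1]
        have hne : ((cs.drop b).take (a - b)).reverse.isEmpty = false := by
          simp [List.take_eq_nil_iff, List.drop_eq_nil_iff]
          omega
        have hfc : (if PySem.Chars.isalpha c = true then c else ' ') = ' ' := by simp [hc']
        rw [List.map_cons, hfc, pvSgo, if_pos (show PySem.Chars.isspace ' ' = true from rfl),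
          if_neg (by rw [hne]; simp), List.foldl_cons, List.reverse_reverse,
          PySem.List.slice_natCast]

theorem pvBridge (cs : List Char) :
    pvFinA cs ((PySem.List.pyRange 0 (cs.length : Int) 1).foldl (pvStepA cs) (PySem.Set.empty, 0, 0, false))
      = PySem.Set.ofList ((PySem.Chars.split₀ (cs.map (fun c => if PySem.Chars.isalpha c then c else ' '))).map String.ofList) := by
  have h := (pvMain cs cs 0 (by simp) (by omega) PySem.Set.empty 0 0).1
  rw [show ((0:Nat):Int) = (0:Int) from rfl] at h
  rw [h]
  rw [show PySem.Chars.split₀ (cs.map (fun c => if PySem.Chars.isalpha c then c else ' '))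
      = pvSgo (cs.map (fun c => if PySem.Chars.isalpha c then c else ' ')) [] from by
    rw [PySem.Chars.split₀, pvGo_eq_sgo]; rfl]
  rw [PySem.Set.ofList_eq_foldl, List.foldl_map]
  rfl

theorem get_words_from_line_spec : Claim_equal_get_words_from_line := by
  intro line _
  unfold Spec_get_words_from_line get_words_from_line get_words_from_line_alt
  exact pvBridge _
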